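-- pv_equiv track=rewrite | github.com/GAAS-MBA/sport-performance-library | src/optimizations/boxing_champions.py | normalize_weight_class
-- ===== SOURCE A (Python) =====
-- from typing import Optional
--
-- WEIGHT_CLASSES = {
--     "minimumweight": {"id": 1, "lbs": 105, "kg": 47.6, "alias": ["strawweight"]},
--     "light_flyweight": {"id": 2, "lbs": 108, "kg": 49.0, "alias": []},
--     "flyweight": {"id": 3, "lbs": 112, "kg": 50.8, "alias": []},
--     "super_flyweight": {"id": 4, "lbs": 115, "kg": 52.2, "alias": []},
--     "bantamweight": {"id": 5, "lbs": 118, "kg": 53.5, "alias": []},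
--     "super_bantamweight": {"id": 6, "lbs": 122, "kg": 55.3, "alias": ["jr_featherweight"]},
--     "featherweight": {"id": 7, "lbs": 126, "kg": 57.2, "alias": []},
--     "super_featherweight": {"id": 8, "lbs": 130, "kg": 59.0, "alias": ["jr_lightweight"]},
--     "lightweight": {"id": 9, "lbs": 135, "kg": 61.2, "alias": []},
--     "super_lightweight": {"id": 10, "lbs": 140, "kg": 63.5, "alias": ["jr_welterweight"]},
--     "welterweight": {"id": 11, "lbs": 147, "kg": 66.7, "alias": []},
--     "super_welterweight": {"id": 12, "lbs": 154, "kg": 69.9, "alias": ["jr_middleweight"]},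
--     "middleweight": {"id": 13, "lbs": 160, "kg": 72.6, "alias": []},
--     "super_middleweight": {"id": 14, "lbs": 168, "kg": 76.2, "alias": []},
--     "light_heavyweight": {"id": 15, "lbs": 175, "kg": 79.4, "alias": []},
--     "cruiserweight": {"id": 16, "lbs": 200, "kg": 90.7, "alias": []},
--     "heavyweight": {"id": 17, "lbs": 200, "kg": 90.7, "alias": []},
-- }
--
-- def normalize_weight_class(query: str) -> Optional[str]:
--     """
--     INPUT: 階級名（英語・別名・ID）
--     OUTPUT: 正規化された階級キー、または None
--     """
--     q = query.lower().strip().replace(" ", "_").replace("-", "_")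
--     if q in WEIGHT_CLASSES:
--         return q
--     for key, info in WEIGHT_CLASSES.items():
--         if q == str(info["id"]):
--             return key
--         if q in info.get("alias", []):
--             return key
--     return None
-- ===== SOURCE B (Python) =====
-- from typing import Optional
--
-- WEIGHT_CLASSES = {
--     "minimumweight": {"id": 1, "lbs": 105, "kg": 47.6, "alias": ["strawweight"]},
--     "light_flyweight": {"id": 2, "lbs": 108, "kg": 49.0, "alias": []},
--     "flyweight": {"id": 3, "lbs": 112, "kg": 50.8, "alias": []},
--     "super_flyweight": {"id": 4, "lbs": 115, "kg": 52.2, "alias": []},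
--     "bantamweight": {"id": 5, "lbs": 118, "kg": 53.5, "alias": []},
--     "super_bantamweight": {"id": 6, "lbs": 122, "kg": 55.3, "alias": ["jr_featherweight"]},
--     "featherweight": {"id": 7, "lbs": 126, "kg": 57.2, "alias": []},
--     "super_featherweight": {"id": 8, "lbs": 130, "kg": 59.0, "alias": ["jr_lightweight"]},
--     "lightweight": {"id": 9, "lbs": 135, "kg": 61.2, "alias": []},
--     "super_lightweight": {"id": 10, "lbs": 140, "kg": 63.5, "alias": ["jr_welterweight"]},
--     "welterweight": {"id": 11, "lbs": 147, "kg": 66.7, "alias": []},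
--     "super_welterweight": {"id": 12, "lbs": 154, "kg": 69.9, "alias": ["jr_middleweight"]},
--     "middleweight": {"id": 13, "lbs": 160, "kg": 72.6, "alias": []},
--     "super_middleweight": {"id": 14, "lbs": 168, "kg": 76.2, "alias": []},
--     "light_heavyweight": {"id": 15, "lbs": 175, "kg": 79.4, "alias": []},
--     "cruiserweight": {"id": 16, "lbs": 200, "kg": 90.7, "alias": []},
--     "heavyweight": {"id": 17, "lbs": 200, "kg": 90.7, "alias": []},
-- }
--
-- # One flat table of every recognizable token (canonical name, str(id), alias),
-- # each paired with its canonical key; sorted once at load. All 39 tokens are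
-- # distinct, so a single binary search resolves any query.
-- _PAIRS = sorted(
--     [(k, k) for k in WEIGHT_CLASSES]
--     + [(str(info["id"]), k) for k, info in WEIGHT_CLASSES.items()]
--     + [(a, k) for k, info in WEIGHT_CLASSES.items() for a in info["alias"]],
--     key=lambda p: p[0],
-- )
-- _TOKENS = [p[0] for p in _PAIRS]
-- _KEYS = [p[1] for p in _PAIRS]
--
-- def normalize_weight_class(query: str) -> Optional[str]:
--     q = query.lower().strip().replace(" ", "_").replace("-", "_")
--     lo, hi = 0, len(_TOKENS)
--     while lo < hi:
--         mid = (lo + hi) // 2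
--         if _TOKENS[mid] < q:
--             lo = mid + 1
--         else:
--             hi = mid
--     if lo < len(_TOKENS) and _TOKENS[lo] == q:
--         return _KEYS[lo]
--     return None
-- ===== Notes on version B (the rewrite author's own statement) =====
-- stated objective: alternative
-- what changed: A tests dict membership and then linearly scans WEIGHT_CLASSES comparing str(id) and alias lists per entry; B flattens every recognizable token (canonical name, str(id), alias) with its key into one list sorted once at load and resolves each query with a hand-written binary search over that table.
import Mathlib
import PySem

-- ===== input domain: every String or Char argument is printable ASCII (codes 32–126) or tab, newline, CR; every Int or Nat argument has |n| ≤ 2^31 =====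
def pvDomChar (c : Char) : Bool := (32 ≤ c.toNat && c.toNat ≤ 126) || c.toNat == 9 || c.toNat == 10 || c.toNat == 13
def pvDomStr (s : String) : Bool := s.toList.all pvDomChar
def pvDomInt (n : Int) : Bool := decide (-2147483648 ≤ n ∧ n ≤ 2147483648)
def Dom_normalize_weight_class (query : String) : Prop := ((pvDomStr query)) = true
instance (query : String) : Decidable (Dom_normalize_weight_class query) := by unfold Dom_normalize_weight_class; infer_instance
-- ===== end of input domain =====

-- B replaces A's per-call linear scan with one flat token table sorted at load plus a binary search per query (alternative; return value only).

-- ===== PORT A =====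
-- WEIGHT_CLASSES as (key, id, aliases); the lbs/kg float fields are never read by the function and are omitted.
def pvWeightClasses : List (String × Int × List String) := [
  ("minimumweight", 1, ["strawweight"]),
  ("light_flyweight", 2, []),
  ("flyweight", 3, []),
  ("super_flyweight", 4, []),
  ("bantamweight", 5, []),
  ("super_bantamweight", 6, ["jr_featherweight"]),
  ("featherweight", 7, []),
  ("super_featherweight", 8, ["jr_lightweight"]),
  ("lightweight", 9, []),
  ("super_lightweight", 10, ["jr_welterweight"]),
  ("welterweight", 11, []),
  ("super_welterweight", 12, ["jr_middleweight"]),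
  ("middleweight", 13, []),
  ("super_middleweight", 14, []),
  ("light_heavyweight", 15, []),
  ("cruiserweight", 16, []),
  ("heavyweight", 17, [])]

-- the 'for key, info in WEIGHT_CLASSES.items():' loop of A
def pvScan (q : String) : List (String × Int × List String) → Option String
  | [] => none
  | (key, id, aliases) :: rest =>
      if q == PySem.Int.toStr id then some key
      else if aliases.contains q then some key
      else pvScan q rest

def normalize_weight_class (query : String) : Option String :=
  let q := PySem.Str.replace (PySem.Str.replace (PySem.Str.strip (PySem.Str.lower query)) " " "_") "-" "_"
  if (pvWeightClasses.map (·.1)).contains q then some q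
  else pvScan q pvWeightClasses

-- ===== PORT B =====
-- _PAIRS of Source B: every token (canonical key, str(id), alias) with its key, sorted once by token.
-- Python's str '<' is code-point lexicographic = Lean's '<' on .toList (PYSEM.md), so the sort key is p.1.toList.
def pvFlat : List (String × String) :=
  (pvWeightClasses.map (fun e => (e.1, e.1)))
  ++ (pvWeightClasses.map (fun e => (PySem.Int.toStr e.2.1, e.1)))
  ++ (pvWeightClasses.flatMap (fun e => e.2.2.map (fun a => (a, e.1))))

def pvPairs : List (String × String) := PySem.List.sorted pvFlat (fun p => p.1.toList) false

def pvTokens : List (List Char) := pvPairs.map (fun p => p.1.toList)   -- _TOKENS (as char lists for '<')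
def pvKeysB : List String := pvPairs.map (fun p => p.2)                -- _KEYS

-- the hand-written 'while lo < hi' bisection loop of Source B; fuel = hi - lo bounds the
-- iterations (the interval shrinks every round), it only makes the recursion structural
def pvBisect (tokens : List (List Char)) (q : List Char) : Nat → Nat → Nat → Nat
  | 0, lo, _ => lo
  | fuel + 1, lo, hi =>
    if lo < hi then
      if PySem.List.pyGetD tokens (((lo + hi) / 2 : Nat) : Int) [] < q
      then pvBisect tokens q fuel ((lo + hi) / 2 + 1) hi
      else pvBisect tokens q fuel lo ((lo + hi) / 2)
    else lo

def normalize_weight_class_alt (query : String) : Option String :=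
  let q := PySem.Str.replace (PySem.Str.replace (PySem.Str.strip (PySem.Str.lower query)) " " "_") "-" "_"
  let lo := pvBisect pvTokens q.toList pvTokens.length 0 pvTokens.length
  if lo < pvTokens.length ∧ PySem.List.pyGetD pvTokens (lo : Int) [] = q.toList
  then some (PySem.List.pyGetD pvKeysB (lo : Int) "")
  else none

-- ===== PRECONDITION & SPEC =====
def Spec_normalize_weight_class (query : String) (out : Option String) : Prop := out = normalize_weight_class_alt query
instance (query : String) (out : Option String) : Decidable (Spec_normalize_weight_class query out) := by unfold Spec_normalize_weight_class; infer_instance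

-- ===== CLAIM (what is proved, stated in full; the proofs are below) =====
def Claim_equal_normalize_weight_class : Prop := ∀ (query : String), Dom_normalize_weight_class query → Spec_normalize_weight_class query (normalize_weight_class query)

-- ===== LEMMAS AND PROOFS =====

-- the 39 tokens of the sorted table, as plain strings (proof-only)
def pvTokensStr : List String := ["1", "10", "11", "12", "13", "14", "15", "16", "17", "2", "3", "4",
  "5", "6", "7", "8", "9", "bantamweight", "cruiserweight", "featherweight", "flyweight",
  "heavyweight", "jr_featherweight", "jr_lightweight", "jr_middleweight", "jr_welterweight",
  "light_flyweight", "light_heavyweight", "lightweight", "middleweight", "minimumweight",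
  "strawweight", "super_bantamweight", "super_featherweight", "super_flyweight",
  "super_lightweight", "super_middleweight", "super_welterweight", "welterweight"]

lemma pvTokens_eq : pvTokens = pvTokensStr.map String.toList := by decide

lemma pvScan_none (q : String) : ∀ t : List (String × Int × List String),
    (∀ e ∈ t, q ≠ PySem.Int.toStr e.2.1 ∧ e.2.2.contains q = false) → pvScan q t = none := by
  intro t
  induction t with
  | nil => intro _; rfl
  | cons e rest ih =>
      intro h
      obtain ⟨⟨h1, h2⟩, hrest⟩ := List.forall_mem_cons.mp h
      obtain ⟨key, id, aliases⟩ := e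
      simp only [pvScan, h2]
      rw [if_neg (by simpa using h1)]
      simp [ih hrest]

-- every canonical key, id string and alias of the table is a token of the sorted table
lemma pvMem_tokens : ∀ e ∈ pvWeightClasses,
    e.1 ∈ pvTokensStr ∧ PySem.Int.toStr e.2.1 ∈ pvTokensStr ∧ ∀ a ∈ e.2.2, a ∈ pvTokensStr := by
  decide

-- the resolution step (everything after normalization) of A equals that of B
lemma pvResolve_eq (q : String) :
    (if (pvWeightClasses.map (·.1)).contains q then some q else pvScan q pvWeightClasses)
    = (if pvBisect pvTokens q.toList pvTokens.length 0 pvTokens.length < pvTokens.length ∧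
          PySem.List.pyGetD pvTokens ((pvBisect pvTokens q.toList pvTokens.length 0 pvTokens.length : Nat) : Int) [] = q.toList
       then some (PySem.List.pyGetD pvKeysB ((pvBisect pvTokens q.toList pvTokens.length 0 pvTokens.length : Nat) : Int) "")
       else none) := by
  by_cases hm : q ∈ pvTokensStr
  · fin_cases hm <;> decide
  · -- q is none of the 39 tokens: both sides are none
    have hA1 : (pvWeightClasses.map (·.1)).contains q = false := by
      simp only [List.contains_eq_mem, decide_eq_false_iff_not, List.mem_map]
      rintro ⟨e, he, rfl⟩
      exact hm (pvMem_tokens e he).1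
    have hA2 : pvScan q pvWeightClasses = none := by
      apply pvScan_none
      intro e he
      refine ⟨fun h => hm ?_, ?_⟩
      · exact h ▸ (pvMem_tokens e he).2.1
      · simp only [List.contains_eq_mem, decide_eq_false_iff_not]
        exact fun ha => hm ((pvMem_tokens e he).2.2 q ha)
    have hB : ¬ (pvBisect pvTokens q.toList pvTokens.length 0 pvTokens.length < pvTokens.length ∧
        PySem.List.pyGetD pvTokens ((pvBisect pvTokens q.toList pvTokens.length 0 pvTokens.length : Nat) : Int) [] = q.toList) := by
      rintro ⟨hlt, heq⟩
      rw [PySem.List.pyGetD_eq_getElem pvTokens [] (by positivity) (by exact_mod_cast hlt)] at heq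
      have hmem : q.toList ∈ pvTokens := heq ▸ List.getElem_mem _
      rw [pvTokens_eq] at hmem
      obtain ⟨s, hs, hsq⟩ := List.mem_map.mp hmem
      exact hm ((String.toList_inj.mp hsq) ▸ hs)
    rw [if_neg hB, hA1]
    simpa using hA2

theorem pv_main (query : String) :
    normalize_weight_class query = normalize_weight_class_alt query := by
  unfold normalize_weight_class normalize_weight_class_alt
  exact pvResolve_eq _

-- ===== VERDICT (by name: the statement is the Claim_ definition above) =====
theorem normalize_weight_class_spec : Claim_equal_normalize_weight_class := by
  intro query _
  unfold Spec_normalize_weight_class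
  exact pv_main query
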